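-- pv_equiv track=rewrite | github.com/ejaszewski/ruthless | util/board_cosnt_gen.py | down_left
-- ===== SOURCE A (Python) =====
-- def down_left(pos):
--     x = pos // 8
--     y = pos % 8
--     bs = ''
--     for i in range(0, 8):
--         for j in range(0, 8):
--             if i - x > 0 and (x - i == j - y):
--                 bs += '1'
--             else:
--                 bs += '0'
--         # bs += '\n'
--     return bs
-- ===== SOURCE B (Python) =====
-- def down_left(pos):
--     x = pos // 8
--     y = pos % 8
--     bs = ''
--     for i in range(8):
--         j = x + y - i
--         if i > x and 0 <= j < 8:
--             bs += '0' * j + '1' + '0' * (7 - j)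
--         else:
--             bs += '00000000'
--     return bs
-- ===== Notes on version B (the rewrite author's own statement) =====
-- stated objective: simpler
-- what changed: B drops the 64-cell scan with a per-cell predicate: it builds each of the 8 rows directly by computing the single diagonal column j = x + y - i and emitting '0'*j + '1' + '0'*(7-j) (or a constant zero row) per iteration.
import Mathlib
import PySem

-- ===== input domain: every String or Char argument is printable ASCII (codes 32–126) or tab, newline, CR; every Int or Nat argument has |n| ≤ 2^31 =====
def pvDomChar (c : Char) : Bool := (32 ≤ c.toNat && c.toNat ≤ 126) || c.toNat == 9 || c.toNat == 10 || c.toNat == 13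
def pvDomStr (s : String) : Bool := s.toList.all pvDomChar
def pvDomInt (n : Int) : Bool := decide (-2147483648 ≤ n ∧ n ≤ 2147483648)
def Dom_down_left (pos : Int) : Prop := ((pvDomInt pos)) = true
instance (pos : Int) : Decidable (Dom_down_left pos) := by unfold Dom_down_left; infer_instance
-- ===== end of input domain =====

-- ===== PORT A =====
def down_left (pos : Int) : String :=
  let x := PySem.Int.floordiv pos 8
  let y := PySem.Int.mod pos 8
  (PySem.List.pyRange 0 8 1).foldl (fun bs i =>
    (PySem.List.pyRange 0 8 1).foldl (fun bs j =>
      if i - x > 0 ∧ x - i = j - y then bs ++ "1" else bs ++ "0") bs) ""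

-- ===== PORT B =====
-- B builds the 64-char board row by row: for each row i it computes the single
-- diagonal column j = x + y - i and emits '0'*j ++ "1" ++ '0'*(7-j) when the
-- cell is on the board (i > x, 0 ≤ j < 8), else a whole row of zeros.
def down_left_alt (pos : Int) : String :=
  let x := PySem.Int.floordiv pos 8
  let y := PySem.Int.mod pos 8
  (PySem.List.pyRange 0 8 1).foldl (fun bs i =>
    let j := x + y - i
    if i > x ∧ 0 ≤ j ∧ j < 8 then
      bs ++ String.ofList (List.replicate j.toNat '0') ++ "1" ++ String.ofList (List.replicate (7 - j).toNat '0')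
    else bs ++ "00000000") ""

-- ===== PRECONDITION & SPEC =====
def Spec_down_left (pos : Int) (out : String) : Prop := out = down_left_alt pos
instance (pos : Int) (out : String) : Decidable (Spec_down_left pos out) := by unfold Spec_down_left; infer_instance

-- ===== CLAIM (what is proved, stated in full; the proofs are below) =====
def Claim_equal_down_left : Prop := ∀ (pos : Int), Dom_down_left pos → Spec_down_left pos (down_left pos)

-- ===== LEMMAS AND PROOFS =====

-- c repeated n times
def pvRepeat (c : String) : Nat → String
  | 0 => ""
  | n + 1 => c ++ pvRepeat c n

-- a fold that appends the fixed string c for every element appends c length-many times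
lemma foldl_append_const {α : Type} (g : String → α → String) (c : String) :
    ∀ (l : List α), (∀ s a, a ∈ l → g s a = s ++ c) → ∀ (bs : String),
      l.foldl g bs = bs ++ pvRepeat c l.length := by
  intro l
  induction l with
  | nil => intro _ bs; simp [pvRepeat]
  | cons a t ih =>
    intro h bs
    simp only [List.foldl_cons, List.length_cons]
    rw [h bs a (by simp), ih (fun s b hb => h s b (by simp [hb]))]
    show _ = bs ++ (c ++ pvRepeat c t.length)
    rw [String.append_assoc]

-- far off the board (pos // 8 outside [-8, 8)) no cell qualifies: both sides are 64 zeros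
lemma down_left_far (pos : Int)
    (hx : 8 ≤ PySem.Int.floordiv pos 8 ∨ PySem.Int.floordiv pos 8 ≤ -8) :
    down_left pos = down_left_alt pos := by
  have hr : PySem.List.pyRange 0 8 1 = [0, 1, 2, 3, 4, 5, 6, 7] := by decide
  unfold down_left down_left_alt
  simp only [hr]
  set x := PySem.Int.floordiv pos 8 with hxdef
  set y := PySem.Int.mod pos 8 with hydef
  have hy0 : 0 ≤ y := PySem.Int.mod_nonneg pos (by norm_num)
  have hy8 : y < 8 := PySem.Int.mod_lt pos (by norm_num)
  have hb : ∀ (i : Int), i ∈ ([0, 1, 2, 3, 4, 5, 6, 7] : List Int) → 0 ≤ i ∧ i ≤ 7 := by decide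
  have hinner : ∀ (s : String) (i : Int), i ∈ ([0, 1, 2, 3, 4, 5, 6, 7] : List Int) →
      List.foldl (fun bs j => if i - x > 0 ∧ x - i = j - y then bs ++ "1" else bs ++ "0") s
        [0, 1, 2, 3, 4, 5, 6, 7] = s ++ pvRepeat "0" 8 := by
    intro s i hi
    have h1 := hb i hi
    have hcell : ∀ (s' : String) (j : Int), j ∈ ([0, 1, 2, 3, 4, 5, 6, 7] : List Int) →
        (if i - x > 0 ∧ x - i = j - y then s' ++ "1" else s' ++ "0") = s' ++ "0" := by
      intro s' j hj
      have h2 := hb j hj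
      exact if_neg (by omega)
    rw [foldl_append_const _ "0" _ hcell s]
    rfl
  rw [foldl_append_const _ (pvRepeat "0" 8) _ hinner ""]
  have hrow : ∀ (s : String) (i : Int), i ∈ ([0, 1, 2, 3, 4, 5, 6, 7] : List Int) →
      (let j := x + y - i;
       if i > x ∧ 0 ≤ j ∧ j < 8 then
         s ++ String.ofList (List.replicate j.toNat '0') ++ "1" ++
           String.ofList (List.replicate (7 - j).toNat '0')
       else s ++ "00000000") = s ++ "00000000" := by
    intro s i hi
    have h1 := hb i hi
    exact if_neg (by omega)
  rw [foldl_append_const _ "00000000" _ hrow ""]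
  decide

-- near the board every input is one of the 128 positions -64 ≤ pos < 64: checked by decide
lemma down_left_near (pos : Int) (h0 : -64 ≤ pos) (h1 : pos < 64) :
    down_left pos = down_left_alt pos := by
  interval_cases pos <;> decide


-- ===== VERDICT (by name: the statement is the Claim_ definition above) =====
theorem down_left_spec : Claim_equal_down_left := by
  intro pos _
  unfold Spec_down_left
  by_cases h : -64 ≤ pos ∧ pos < 64
  · exact down_left_near pos h.1 h.2
  · apply down_left_far
    have hid := PySem.Int.floordiv_mul_add_mod pos 8
    have hy0 : 0 ≤ PySem.Int.mod pos 8 := PySem.Int.mod_nonneg pos (by norm_num)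
    have hy8 : PySem.Int.mod pos 8 < 8 := PySem.Int.mod_lt pos (by norm_num)
    omega
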